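-- pv_equiv track=rewrite | github.com/fabbyrob/science | pileup_analyzers/intronVdivergence.py | correctIndex
-- ===== SOURCE A (Python) =====
-- def correctIndex(start, seq):
--     x = start
--     dict = {}
--     for i in range(0, len(seq)):
--         if seq[i] == "-":
--             continue
--         dict[x] = i
--         x += 1
--
--     return dict
-- ===== SOURCE B (Python) =====
-- def correctIndex(start, seq):
--     key = start + sum(ch != "-" for ch in seq)
--     pairs = []
--     for i in reversed(range(len(seq))):
--         if seq[i] != "-":
--             key -= 1
--             pairs.append((key, i))
--     pairs.reverse()
--     return dict(pairs)
-- ===== Notes on version B (the rewrite author's own statement) =====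
-- stated objective: alternative
-- what changed: B builds the mapping back-to-front: it precomputes the number of non-gap characters to get the last key, walks the string in reverse decrementing the key while collecting pairs, reverses the pair list and turns it into a dict, instead of A's forward loop with an incrementing counter inserting into the dict directly.
import Mathlib
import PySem

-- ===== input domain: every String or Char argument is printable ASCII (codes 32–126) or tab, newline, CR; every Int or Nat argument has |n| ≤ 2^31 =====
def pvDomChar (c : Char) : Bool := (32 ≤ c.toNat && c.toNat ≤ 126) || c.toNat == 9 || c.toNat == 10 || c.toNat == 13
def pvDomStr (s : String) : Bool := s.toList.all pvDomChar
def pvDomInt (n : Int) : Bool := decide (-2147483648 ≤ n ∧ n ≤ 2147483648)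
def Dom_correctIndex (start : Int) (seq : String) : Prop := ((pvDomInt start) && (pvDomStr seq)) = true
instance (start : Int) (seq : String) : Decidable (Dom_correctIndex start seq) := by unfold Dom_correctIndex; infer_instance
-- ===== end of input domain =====

-- B builds the mapping back-to-front: it precomputes the non-gap count to know the last key,
-- walks the string in reverse decrementing the key, then reverses the collected pairs (same O(n) cost).

-- ===== PORT A =====
-- literal port of A: running counter x, dict built by insertion over range(len(seq))
def correctIndex (start : Int) (seq : String) : List (Int × Int) :=
  (((PySem.List.pyRange 0 (seq.toList.length : Int) 1).foldl
      (fun (st : Int × PySem.Dict Int Int) i =>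
        if PySem.Str.pyGet? seq i == some '-' then st
        else (st.1 + 1, st.2.insert st.1 i))
      (start, PySem.Dict.empty)).2).items

-- ===== PORT B =====
-- literal port of B: key = start + sum(ch != '-' ...); reversed(range(len(seq))) loop appending
-- (key, i) pairs while decrementing key; pairs.reverse(); dict(pairs)
def correctIndex_alt (start : Int) (seq : String) : List (Int × Int) :=
  let key0 : Int := start + (seq.toList.map (fun c => if c != '-' then (1 : Int) else 0)).sum
  let st := ((PySem.List.pyRange 0 (seq.toList.length : Int) 1).reverse).foldl
      (fun (st : Int × List (Int × Int)) i =>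
        if PySem.Str.pyGet? seq i != some '-' then (st.1 - 1, st.2 ++ [(st.1 - 1, i)]) else st)
      (key0, [])
  (PySem.Dict.ofList st.2.reverse).items

-- ===== PRECONDITION & SPEC =====
def Spec_correctIndex (start : Int) (seq : String) (out : List (Int × Int)) : Prop := out = correctIndex_alt start seq
instance (start : Int) (seq : String) (out : List (Int × Int)) : Decidable (Spec_correctIndex start seq out) := by unfold Spec_correctIndex; infer_instance

-- ===== CLAIM (what is proved, stated in full; the proofs are below) =====
def Claim_equal_correctIndex : Prop := ∀ (start : Int) (seq : String), Dom_correctIndex start seq → Spec_correctIndex start seq (correctIndex start seq)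

-- ===== LEMMAS AND PROOFS =====

/-- common reference: result pairs for chars `xs` at sequence index `s`, next key `x` -/
def pvGo (xs : List Char) (s x : Int) : List (Int × Int) :=
  match xs with
  | [] => []
  | c :: t => if c = '-' then pvGo t (s + 1) x else (x, s) :: pvGo t (s + 1) (x + 1)

/-- A's loop over (index, char) pairs appends pvGo to the accumulated dict -/
theorem pv_foldA (xs : List Char) (s x : Int) (acc : PySem.Dict Int Int)
    (hk : ∀ k ∈ acc.keys, k < x) :
    (((PySem.List.enumerate xs s).foldl
        (fun (st : Int × PySem.Dict Int Int) p =>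
          if p.2 == '-' then st else (st.1 + 1, st.2.insert st.1 p.1)) (x, acc)).2).items
      = acc.items ++ pvGo xs s x := by
  induction xs generalizing s x acc with
  | nil => simp [PySem.List.enumerate_nil, pvGo]
  | cons c t ih =>
      by_cases h : c = '-'
      · simpa [PySem.List.enumerate_cons, pvGo, h] using ih (s + 1) x acc hk
      · have hnc : acc.contains x = false := by
          by_contra hc
          have : x ∈ acc.keys := by
            rw [← PySem.Dict.contains_iff_mem_keys]
            simpa using hc
          exact absurd (hk x this) (by omega)
        have hk' : ∀ k ∈ (acc.insert x s).keys, k < x + 1 := by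
          intro k hkm
          rcases (PySem.Dict.mem_keys_insert _ _ _ _).mp hkm with rfl | hm
          · omega
          · have := hk k hm; omega
        rw [PySem.List.enumerate_cons, List.foldl_cons]
        have hb : ((((s, c) : Int × Char)).2 == '-') = false := by simpa using h
        simp only [hb, Bool.false_eq_true, if_false]
        rw [ih (s + 1) (x + 1) (acc.insert x s) hk',
            PySem.Dict.items_insert_of_not_contains (h := hnc)]
        simp [pvGo, h, List.append_assoc]

/-- A's pyRange-indexed loop equals the loop over enumerate -/
theorem pv_convA (seq : String) (st0 : Int × PySem.Dict Int Int) :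
    (PySem.List.pyRange 0 (seq.toList.length : Int) 1).foldl
      (fun (st : Int × PySem.Dict Int Int) i =>
        if PySem.Str.pyGet? seq i == some '-' then st
        else (st.1 + 1, st.2.insert st.1 i)) st0
    = (PySem.List.enumerate seq.toList 0).foldl
      (fun (st : Int × PySem.Dict Int Int) p =>
        if p.2 == '-' then st else (st.1 + 1, st.2.insert st.1 p.1)) st0 := by
  rw [PySem.List.enumerate_eq_map_pyRange (d := '-'), List.foldl_map]
  apply PySem.List.foldl_congr_mem
  intro acc j hj
  have hj' := (PySem.List.mem_pyRange_one).mp hj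
  obtain ⟨n, rfl⟩ : ∃ n : Nat, j = (n : Int) := ⟨j.toNat, by omega⟩
  have hlt : n < seq.toList.length := by exact_mod_cast hj'.2
  have hd : PySem.List.pyGetD seq.toList (n : Int) '-' = seq.toList[n] := by
    simp [PySem.List.pyGetD_natCast, List.getElem?_eq_getElem hlt]
  simp [hd, List.getElem?_eq_getElem hlt]

/-- B's reversed-range loop equals the foldr over enumerate -/
theorem pv_convB (seq : String) (st0 : Int × List (Int × Int)) :
    ((PySem.List.pyRange 0 (seq.toList.length : Int) 1).reverse).foldl
      (fun (st : Int × List (Int × Int)) i =>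
        if PySem.Str.pyGet? seq i != some '-' then (st.1 - 1, st.2 ++ [(st.1 - 1, i)]) else st) st0
    = (PySem.List.enumerate seq.toList 0).foldr
      (fun (p : Int × Char) (st : Int × List (Int × Int)) =>
        if p.2 != '-' then (st.1 - 1, st.2 ++ [(st.1 - 1, p.1)]) else st) st0 := by
  rw [PySem.List.enumerate_eq_map_pyRange (d := '-'), ← List.foldl_reverse, ← List.map_reverse,
      List.foldl_map]
  apply PySem.List.foldl_congr_mem
  intro acc j hj
  have hj' := (PySem.List.mem_pyRange_one).mp (List.mem_reverse.mp hj)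
  obtain ⟨n, rfl⟩ : ∃ n : Nat, j = (n : Int) := ⟨j.toNat, by omega⟩
  have hlt : n < seq.toList.length := by exact_mod_cast hj'.2
  have hd : PySem.List.pyGetD seq.toList (n : Int) '-' = seq.toList[n] := by
    simp [PySem.List.pyGetD_natCast, List.getElem?_eq_getElem hlt]
  simp [hd, List.getElem?_eq_getElem hlt]

/-- B's reverse walk produces pvGo reversed, with the key ending at `key - #non-gaps` -/
theorem pv_foldB (xs : List Char) (s key : Int) :
    (PySem.List.enumerate xs s).foldr
      (fun (p : Int × Char) (st : Int × List (Int × Int)) =>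
        if p.2 != '-' then (st.1 - 1, st.2 ++ [(st.1 - 1, p.1)]) else st)
      (key, ([] : List (Int × Int)))
    = (key - (xs.countP (fun c => c != '-') : Int),
       (pvGo xs s (key - (xs.countP (fun c => c != '-') : Int))).reverse) := by
  induction xs generalizing s with
  | nil => simp [PySem.List.enumerate_nil, pvGo]
  | cons c t ih =>
      rw [PySem.List.enumerate_cons, List.foldr_cons, ih (s + 1)]
      by_cases h : c = '-'
      · simp [pvGo, h, List.countP_cons]
      · have hc : (t.countP (fun c => c != '-') : Int) + 1
            = ((c :: t).countP (fun c => c != '-') : Int) := by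
          simp [List.countP_cons, h]
        simp only [pvGo, h, if_false]
        have harith : key - ((c :: t).countP (fun c => c != '-') : Int)
            = key - (t.countP (fun c => c != '-') : Int) - 1 := by omega
        simp [h, harith]
        and_intros <;> first | omega | (congr 1 <;> omega)

/-- the keys of pvGo are the consecutive range starting at x -/
theorem pv_keys (xs : List Char) (s x : Int) :
    (pvGo xs s x).map (·.1)
      = PySem.List.pyRange x (x + (xs.countP (fun c => c != '-') : Int)) 1 := by
  induction xs generalizing s x with
  | nil => simp [pvGo, PySem.List.pyRange_one_eq_nil]
  | cons c t ih =>
      by_cases h : c = '-'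
      · simpa [pvGo, h, List.countP_cons] using ih (s + 1) x
      · have hcnt : ((c :: t).countP (fun c => c != '-') : Int)
            = (t.countP (fun c => c != '-') : Int) + 1 := by
          simp [List.countP_cons, h]
        have hlt : x < x + ((c :: t).countP (fun c => c != '-') : Int) := by
          have : (0 : Int) ≤ (t.countP (fun c => c != '-') : Int) := Int.natCast_nonneg _
          omega
        rw [PySem.List.pyRange_one_cons hlt]
        have harith : x + ((c :: t).countP (fun c => c != '-') : Int)
            = (x + 1) + (t.countP (fun c => c != '-') : Int) := by omega
        simp [pvGo, h, ih (s + 1) (x + 1)]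
        congr 1
        omega

/-- dict(pairs) of pairs with distinct keys lists exactly those pairs -/
theorem pv_ofList_items (l : List (Int × Int)) (h : (l.map (·.1)).Nodup) :
    (PySem.Dict.ofList l).items = l := by
  have hof : PySem.Dict.ofList l
      = l.foldl (fun (d : PySem.Dict Int Int) p => d.insert p.1 p.2) PySem.Dict.empty := by
    simp [PySem.Dict.ofList, PySem.Dict.update]
  rw [hof]
  have := PySem.Dict.items_foldl_insert_fresh (l := l)
      (k := fun p => p.1) (v := fun p => p.2) (d := PySem.Dict.empty)
      (by intro a _; simp) h
  simpa using this

/-- B computes pvGo -/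
theorem pv_B_eq (start : Int) (seq : String) :
    correctIndex_alt start seq = pvGo seq.toList 0 start := by
  have hS : (seq.toList.map (fun c => if c != '-' then (1 : Int) else 0)).sum
      = (seq.toList.countP (fun c => c != '-') : Int) := by
    simpa using PySem.List.sum_map_ite_one_zero (xs := seq.toList) (p := fun c => c != '-')
  simp only [correctIndex_alt, hS, pv_convB, pv_foldB]
  have harith : start + (seq.toList.countP (fun c => c != '-') : Int)
      - (seq.toList.countP (fun c => c != '-') : Int) = start := by omega
  rw [harith, List.reverse_reverse, pv_ofList_items]
  rw [pv_keys]
  exact PySem.List.nodup_pyRange_one _ _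

-- ===== VERDICT (by name: the statement is the Claim_ definition above) =====
theorem correctIndex_spec : Claim_equal_correctIndex := by
  intro start seq _
  unfold Spec_correctIndex correctIndex
  rw [pv_convA, pv_foldA seq.toList 0 start PySem.Dict.empty (by simp), pv_B_eq]
  simp [PySem.Dict.empty]
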